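-- pv_equiv track=rewrite | github.com/BryanMcHugh/IP-calculator | ip_calculator.py | last_ip
-- ===== SOURCE A (Python) =====
-- def last_ip(ip_bin):
-- 	last = ""
-- 	p = 0
-- 	for i in ip_bin:
-- 	    if p == 0:
-- 	        if i == "0":
-- 	            last += "0"
-- 	            p = 1
-- 	        else:
-- 	            last += "1"
-- 	    else:
-- 	        if i == ".":
-- 	            last += "."
-- 	        else:
-- 	            last += "1"
-- 	return last
-- ===== SOURCE B (Python) =====
-- def last_ip(ip_bin):
--     idx = ip_bin.find('0')
--     if idx == -1:
--         return '1' * len(ip_bin)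
--     return '1' * idx + '0' + ''.join('.' if c == '.' else '1' for c in ip_bin[idx + 1:])
-- ===== Notes on version B (the rewrite author's own statement) =====
-- stated objective: faster
-- what changed: B locates the first zero character with str.find and emits the result as three segments (a run of ones, the zero, and a dot-preserving mapped tail) instead of growing a string character-by-character under a phase flag, avoiding A's quadratic repeated string concatenation.
import Mathlib
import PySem

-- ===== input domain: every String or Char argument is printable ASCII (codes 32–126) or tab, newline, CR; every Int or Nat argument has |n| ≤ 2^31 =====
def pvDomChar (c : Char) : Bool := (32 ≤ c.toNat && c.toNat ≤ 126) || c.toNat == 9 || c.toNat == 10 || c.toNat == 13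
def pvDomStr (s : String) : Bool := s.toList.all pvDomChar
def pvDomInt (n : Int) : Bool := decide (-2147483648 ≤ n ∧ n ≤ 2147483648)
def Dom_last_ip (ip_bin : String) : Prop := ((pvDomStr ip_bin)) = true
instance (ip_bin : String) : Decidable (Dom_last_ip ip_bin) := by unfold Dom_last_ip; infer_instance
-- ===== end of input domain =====

-- B replaces A's phase-flag accumulator loop by find-the-first-zero plus segment construction, avoiding repeated string concatenation (measured faster).

-- ===== PORT A =====
def aStep (st : List Char × Int) (i : Char) : List Char × Int :=
  if st.2 == 0 then
    if i == '0' then (st.1 ++ ['0'], 1) else (st.1 ++ ['1'], st.2)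
  else
    if i == '.' then (st.1 ++ ['.'], st.2) else (st.1 ++ ['1'], st.2)

def last_ip (ip_bin : String) : String :=
  String.mk (ip_bin.toList.foldl aStep ([], 0)).1

-- ===== PORT B =====
def bMap (c : Char) : Char := if c == '.' then '.' else '1'

def last_ip_alt (ip_bin : String) : String :=
  let idx := PySem.Str.find ip_bin "0"
  if idx == -1 then String.mk (List.replicate ip_bin.toList.length '1')
  else String.mk (List.replicate idx.toNat '1' ++
    '0' :: (ip_bin.toList.drop (idx.toNat + 1)).map bMap)

-- ===== PRECONDITION & SPEC =====
def Spec_last_ip (ip_bin : String) (out : String) : Prop := out = last_ip_alt ip_bin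
instance (ip_bin : String) (out : String) : Decidable (Spec_last_ip ip_bin out) := by unfold Spec_last_ip; infer_instance

-- ===== CLAIM (what is proved, stated in full; the proofs are below) =====
def Claim_equal_last_ip : Prop := ∀ (ip_bin : String), Dom_last_ip ip_bin → Spec_last_ip ip_bin (last_ip ip_bin)

-- ===== LEMMAS AND PROOFS =====

-- [a] is a prefix of l.drop i iff l[i]? = some a
lemma single_prefix_drop (a : Char) (l : List Char) (i : ℕ) :
    [a] <+: l.drop i ↔ l[i]? = some a := by
  rw [List.cons_prefix_iff]
  rw [← List.head?_drop]
  cases (l.drop i) <;> simp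

lemma find_single_cons (a c : Char) (cs : List Char) :
    PySem.Chars.find (c :: cs) [a] =
      if c = a then 0
      else if PySem.Chars.find cs [a] = -1 then -1
      else PySem.Chars.find cs [a] + 1 := by
  have hiff : ∀ (l : List Char), PySem.Chars.find l [a] ≠ -1 ↔ ∃ j, [a] <+: l.drop j := by
    intro l
    rw [PySem.Chars.find_ne_neg_one_iff, ← PySem.Chars.isIn_iff_infix,
      ← PySem.Chars.exists_prefix_drop_iff_isIn]
  by_cases hc : c = a
  · subst hc
    have hd0 : [c] <+: (c :: cs).drop 0 := by simp
    have hne : PySem.Chars.find (c :: cs) [c] ≠ -1 := (hiff _).2 ⟨0, hd0⟩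
    have h0 : 0 ≤ PySem.Chars.find (c :: cs) [c] := by
      have := PySem.Chars.neg_one_le_find (c :: cs) [c]; omega
    obtain ⟨-, hmin⟩ := PySem.Chars.find_spec h0
    have : ¬ (0 < (PySem.Chars.find (c :: cs) [c]).toNat) := by
      intro h
      exact hmin 0 h hd0
    rw [if_pos rfl]
    omega
  · rw [if_neg hc]
    by_cases hn : PySem.Chars.find cs [a] = -1
    · rw [if_pos hn]
      by_contra hne
      obtain ⟨j, hj⟩ := (hiff _).1 hne
      rw [single_prefix_drop] at hj
      cases j with
      | zero =>
          simp only [List.getElem?_cons_zero, Option.some.injEq] at hj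
          exact hc hj
      | succ k =>
          have hk : [a] <+: cs.drop k := by rw [single_prefix_drop]; simpa using hj
          exact ((hiff cs).2 ⟨k, hk⟩) hn
    · rw [if_neg hn]
      have hn0 : 0 ≤ PySem.Chars.find cs [a] := by
        have := PySem.Chars.neg_one_le_find cs [a]; omega
      obtain ⟨hpre, hminn⟩ := PySem.Chars.find_spec hn0
      have hne : PySem.Chars.find (c :: cs) [a] ≠ -1 :=
        (hiff _).2 ⟨(PySem.Chars.find cs [a]).toNat + 1, by
          rw [List.drop_succ_cons]; exact hpre⟩
      have hm0 : 0 ≤ PySem.Chars.find (c :: cs) [a] := by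
        have := PySem.Chars.neg_one_le_find (c :: cs) [a]; omega
      obtain ⟨hprem, hminm⟩ := PySem.Chars.find_spec hm0
      set m := PySem.Chars.find (c :: cs) [a] with hmdef
      set n := PySem.Chars.find cs [a] with hndef
      have hmne0 : m.toNat ≠ 0 := by
        intro h
        rw [h] at hprem
        rw [List.drop_zero] at hprem
        obtain ⟨t, ht⟩ := hprem
        simp only [List.cons_append, List.nil_append, List.cons.injEq] at ht
        exact hc ht.1.symm
      obtain ⟨k, hk⟩ : ∃ k, m.toNat = k + 1 := ⟨m.toNat - 1, by omega⟩
      have hk2 : [a] <+: cs.drop k := by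
        have := hprem; rw [hk, List.drop_succ_cons] at this; exact this
      have hnk : n.toNat ≤ k := by
        by_contra h
        exact hminn k (by omega) hk2
      have hmle : m.toNat ≤ n.toNat + 1 := by
        by_contra h
        exact hminm (n.toNat + 1) (by omega) (by rw [List.drop_succ_cons]; exact hpre)
      omega

lemma foldl_phase1 (cs : List Char) (acc : List Char) (p : Int) (hp : p ≠ 0) :
    cs.foldl aStep (acc, p) = (acc ++ cs.map bMap, p) := by
  induction cs generalizing acc with
  | nil => simp
  | cons c cs ih =>
      have hpb : (p == 0) = false := by simpa using hp
      by_cases hc : c = '.'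
      · simp [aStep, hpb, hc, ih, bMap, List.append_assoc]
      · have : (c == '.') = false := by simpa using hc
        simp [aStep, hpb, this, ih, bMap, List.append_assoc]

def bodyB (cs : List Char) : List Char :=
  if PySem.Chars.find cs ['0'] = -1 then List.replicate cs.length '1'
  else List.replicate (PySem.Chars.find cs ['0']).toNat '1' ++
    '0' :: (cs.drop ((PySem.Chars.find cs ['0']).toNat + 1)).map bMap

lemma foldl_phase0 (cs : List Char) (acc : List Char) :
    (cs.foldl aStep (acc, 0)).1 = acc ++ bodyB cs := by
  induction cs generalizing acc with
  | nil =>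
      have : PySem.Chars.find ([] : List Char) ['0'] = -1 :=
        (PySem.Chars.find_eq_neg_one_iff _ _).2 (by simp)
      simp [bodyB, this]
  | cons c cs ih =>
      by_cases hc : c = '0'
      · subst hc
        have h1 : List.foldl aStep (acc ++ ['0'], 1) cs = (acc ++ ['0'] ++ cs.map bMap, 1) :=
          foldl_phase1 cs _ 1 one_ne_zero
        simp [aStep, h1, bodyB, find_single_cons]
      · have hcb : (c == '0') = false := by simpa using hc
        have hfind := find_single_cons '0' c cs
        by_cases hn : PySem.Chars.find cs ['0'] = -1
        · simp [aStep, hcb, ih, bodyB, hfind, hc, hn, List.replicate_succ]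
        · have h0 : (0 : Int) ≤ PySem.Chars.find cs ['0'] := by
            rcases (PySem.Chars.neg_one_le_find cs ['0']).lt_or_eq with h | h
            · omega
            · exact absurd h.symm hn
          have ht : (PySem.Chars.find cs ['0'] + 1).toNat
              = (PySem.Chars.find cs ['0']).toNat + 1 := by omega
          have hne : ¬(PySem.Chars.find cs ['0'] + 1 = -1) := by omega
          simp [aStep, hcb, ih, bodyB, hfind, hc, hn, hne, ht, List.replicate_succ,
            List.map_drop]

-- ===== VERDICT (by name: the statement is the Claim_ definition above) =====
theorem last_ip_spec : Claim_equal_last_ip := by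
  intro s _
  show _ = _
  unfold last_ip last_ip_alt
  rw [foldl_phase0 s.toList []]
  simp only [PySem.Str.find_eq]
  have h0 : ("0" : String).toList = ['0'] := rfl
  rw [h0]
  unfold bodyB
  simp only [beq_iff_eq]
  split_ifs with h <;> simp [List.map_drop]
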